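-- pv_equiv track=rewrite | github.com/RealmL/AMR_graph_generator | main.py | pop_relationship
-- ===== SOURCE A (Python) =====
-- def pop_relationship(stack):
--     res = ""
--     q_count = 0
--     slice_position = 0
--     for i, c in enumerate(stack[::-1]):
--         res += c
--         if (c == ":"):
--             slice_position = i
--         if (c == "("):
--             q_count += 1
--             if (q_count == 2):
--                 return res[::-1], stack[:-1 * (slice_position + 1)]
-- ===== SOURCE B (Python) =====
-- def pop_relationship(stack):
--     r = stack[::-1]
--     first = r.find("(")
--     if first == -1:
--         return None
--     second = r.find("(", first + 1)
--     if second == -1: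
--         return None
--     n = len(stack)
--     j = n - 1 - second
--     k = stack.find(":", j + 1)
--     cut = k if k != -1 else n - 1
--     return stack[j:], stack[:cut]
-- ===== Notes on version B (the rewrite author's own statement) =====
-- stated objective: faster
-- what changed: Instead of walking the reversed string char-by-char while concatenating a result string and tracking counters, B locates the second opening bracket from the end with two C-level str.find calls on the reversed string, finds the cut point with one more str.find for the colon after that position, and returns two direct slices of the stack.
import Mathlib
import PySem

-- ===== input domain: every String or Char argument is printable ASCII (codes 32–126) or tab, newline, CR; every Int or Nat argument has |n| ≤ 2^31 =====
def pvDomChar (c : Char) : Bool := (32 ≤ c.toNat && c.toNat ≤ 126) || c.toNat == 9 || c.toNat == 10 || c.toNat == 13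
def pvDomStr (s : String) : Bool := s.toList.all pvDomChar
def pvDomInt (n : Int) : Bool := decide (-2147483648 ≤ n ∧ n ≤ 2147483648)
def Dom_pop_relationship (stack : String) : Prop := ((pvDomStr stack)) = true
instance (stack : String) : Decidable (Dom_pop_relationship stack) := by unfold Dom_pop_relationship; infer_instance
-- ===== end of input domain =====

-- B replaces A's char-by-char loop over the reversed string (with string concatenation and
-- counters) by two find calls for '(' on the reversed string, one find for ':' on the original,
-- and two direct slices; objective: faster (constant-factor, measured).

-- ===== PORT A =====
-- the loop 'for i, c in enumerate(stack[::-1]): …' of A; stack[::-1] is the reverse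
-- (PySem.List.slice?_none_none_neg_one), likewise res[::-1] at the return.
def popALoop (stk : List Char) : List (Int × Char) → List Char → Int → Int → Option (String × String)
  | [], _, _, _ => none
  | (i, c) :: rest, res, q, sp =>
    let res' := res ++ [c]
    let sp' := if c = ':' then i else sp
    if c = '(' then
      if q + 1 = 2 then
        some (String.ofList res'.reverse,
              String.ofList (PySem.List.slice stk none (some (-1 * (sp' + 1)))))
      else popALoop stk rest res' (q + 1) sp'
    else popALoop stk rest res' q sp'

def pop_relationship (stack : String) : Option (String × String) :=
  popALoop stack.toList (PySem.List.enumerate stack.toList.reverse 0) [] 0 0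

-- ===== PORT B =====
def pop_relationship_alt (stack : String) : Option (String × String) :=
  let s := stack.toList
  let r := s.reverse                                   -- r = stack[::-1]
  let first := PySem.Chars.find r ['(']                -- r.find("(")
  if first = -1 then none
  else
    let second := PySem.Chars.findFrom r ['('] (first + 1) none   -- r.find("(", first+1)
    if second = -1 then none
    else
      let n : Int := s.length                          -- len(stack)
      let j := n - 1 - second
      let k := PySem.Chars.findFrom s [':'] (j + 1) none          -- stack.find(":", j+1)
      let cut := if k ≠ -1 then k else n - 1
      some (String.ofList (PySem.List.slice s (some j) none),     -- stack[j:]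
            String.ofList (PySem.List.slice s none (some cut)))   -- stack[:cut]

-- ===== PRECONDITION & SPEC =====
def Spec_pop_relationship (stack : String) (out : Option (String × String)) : Prop := out = pop_relationship_alt stack
instance (stack : String) (out : Option (String × String)) : Decidable (Spec_pop_relationship stack out) := by unfold Spec_pop_relationship; infer_instance

-- ===== CLAIM (what is proved, stated in full; the proofs are below) =====
def Claim_equal_pop_relationship : Prop := ∀ (stack : String), Dom_pop_relationship stack → Spec_pop_relationship stack (pop_relationship stack)

-- ===== LEMMAS AND PROOFS =====

-- abstract form of A's loop state: index of the second '(' and the last ':' index before it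
def findSecond : List Char → Int → Int → Int → Option (Int × Int)
  | [], _, _, _ => none
  | c :: rest, i, q, sp =>
    let sp' := if c = ':' then i else sp
    if c = '(' then
      if q + 1 = 2 then some (i, sp')
      else findSecond rest (i + 1) (q + 1) sp'
    else findSecond rest (i + 1) q sp'

-- index of the last ':' in the list (indices starting at i; sp if none)

def lastC : List Char → Int → Int → Int
  | [], _, sp => sp
  | c :: rest, i, sp => lastC rest (i + 1) (if c = ':' then i else sp)

lemma find_go_lb (sub : List Char) (s : List Char) (k : Nat) :
    PySem.Chars.find.go sub s k = -1 ∨ (k : Int) ≤ PySem.Chars.find.go sub s k := by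
  induction s generalizing k with
  | nil =>
      simp only [PySem.Chars.find.go]
      by_cases h : sub.isEmpty <;> simp [h]
  | cons d t ih =>
      simp only [PySem.Chars.find.go]
      by_cases h : sub.isPrefixOf (d :: t) <;> simp only [h, ite_true]
      · simp
      · rcases ih (k+1) with h2 | h2
        · left; exact h2
        · right; omega

lemma find_go_shift (sub : List Char) (s : List Char) (k : Nat) :
    PySem.Chars.find.go sub s k =
      if PySem.Chars.find.go sub s 0 = -1 then -1 else PySem.Chars.find.go sub s 0 + k := by
  induction s generalizing k with
  | nil =>
      simp only [PySem.Chars.find.go]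
      by_cases h : sub.isEmpty <;> simp [h]
  | cons d t ih =>
      simp only [PySem.Chars.find.go]
      by_cases h : sub.isPrefixOf (d :: t) <;> simp only [h, ite_true]
      · simp
      · rw [ih (k+1), ih 1]
        rcases find_go_lb sub t 0 with h2 | h2 <;> by_cases h3 : PySem.Chars.find.go sub t 0 = -1 <;>
          simp [h2, h3] <;> omega

lemma find_nil (c : Char) : PySem.Chars.find [] [c] = -1 := by
  simp [PySem.Chars.find, PySem.Chars.find.go, List.isEmpty]

lemma find_cons (d : Char) (cs : List Char) (c : Char) :
    PySem.Chars.find (d :: cs) [c] =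
      if d = c then 0
      else if PySem.Chars.find cs [c] = -1 then -1 else PySem.Chars.find cs [c] + 1 := by
  simp only [PySem.Chars.find, PySem.Chars.find.go]
  have hpre : ([c].isPrefixOf (d :: cs)) = (c == d) := by
    simp [List.isPrefixOf]
  rw [hpre, find_go_shift [c] cs 1]
  by_cases h : d = c
  · simp [h]
  · have : (c == d) = false := by simp [Ne.symm h]
    simp [this, h]

lemma findc_spec (ys : List Char) (c : Char) :
    (PySem.Chars.find ys [c] = -1 ∧ c ∉ ys) ∨
    (∃ k : Nat, PySem.Chars.find ys [c] = (k : Int) ∧ k < ys.length ∧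
      ys.take (k + 1) = ys.take k ++ [c]) := by
  induction ys with
  | nil => left; exact ⟨find_nil c, by simp⟩
  | cons d t ih =>
      rw [find_cons]
      by_cases h : d = c
      · right; exact ⟨0, by simp [h], by simp, by simp [h]⟩
      · rcases ih with ⟨h1, h2⟩ | ⟨k, h1, h2, h3⟩
        · left; simp [h, h1, h2, Ne.symm h]
        · right
          refine ⟨k + 1, ?_, by simpa using h2, ?_⟩
          · simp [h, h1]
          · simp [List.take_succ_cons, h3]

lemma findSecond_ge (rest : List Char) (i q sp i2 sp2 : Int)
    (h : findSecond rest i q sp = some (i2, sp2)) : i ≤ i2 := by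
  induction rest generalizing i q sp with
  | nil => simp [findSecond] at h
  | cons c t ih =>
      simp only [findSecond] at h
      by_cases h1 : c = '(' <;> by_cases h2 : q + 1 = 2 <;> simp only [h1, h2, if_true, if_false] at h
      · simp at h; omega
      · have := ih (i+1) (q+1) _ h; omega
      · have := ih (i+1) q _ h; omega
      · have := ih (i+1) q _ h; omega

lemma popALoop_eq (stk : List Char) (rest : List Char) (i0 : Int) (res : List Char) (q sp : Int) :
    popALoop stk (PySem.List.enumerate rest i0) res q sp =
      match findSecond rest i0 q sp with
      | none => none
      | some (i2, sp2) =>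
          some (String.ofList (res ++ rest.take (i2 - i0 + 1).toNat).reverse,
                String.ofList (PySem.List.slice stk none (some (-1 * (sp2 + 1))))) := by
  induction rest generalizing i0 res q sp with
  | nil => simp [PySem.List.enumerate_nil, popALoop, findSecond]
  | cons c t ih =>
      rw [PySem.List.enumerate_cons]
      simp only [popALoop, findSecond]
      by_cases h1 : c = '(' <;> by_cases h2 : q + 1 = 2 <;>
        simp only [h1, h2, if_true, if_false]
      · simp
      · rw [ih]
        cases hfs : findSecond t (i0 + 1) (q + 1) sp with
        | none => simp [hfs]
        | some p =>
            obtain ⟨i2, sp2⟩ := p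
            have hge := findSecond_ge _ _ _ _ _ _ hfs
            have htn : (i2 - i0 + 1).toNat = (i2 - (i0 + 1) + 1).toNat + 1 := by omega
            simp [hfs, htn, List.take_succ_cons]
      all_goals {
        rw [ih]
        cases hfs : findSecond t (i0 + 1) q (if c = ':' then i0 else sp) with
        | none => simp [hfs]
        | some p =>
            obtain ⟨i2, sp2⟩ := p
            have hge := findSecond_ge _ _ _ _ _ _ hfs
            have htn : (i2 - i0 + 1).toNat = (i2 - (i0 + 1) + 1).toNat + 1 := by omega
            simp [hfs, htn, List.take_succ_cons] }


lemma find_plus_one_ne (t : List Char) (c : Char) (h2 : PySem.Chars.find t [c] ≠ -1) :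
    PySem.Chars.find t [c] + 1 ≠ -1 ∧ 0 ≤ PySem.Chars.find t [c] := by
  rcases find_go_lb [c] t 0 with hl | hl
  · exact absurd hl h2
  · simp only [PySem.Chars.find] at *; omega

lemma findSecond_q1_none (rs : List Char) (i sp : Int)
    (h : PySem.Chars.find rs ['('] = -1) : findSecond rs i 1 sp = none := by
  induction rs generalizing i sp with
  | nil => simp [findSecond]
  | cons c t ih =>
      rw [find_cons] at h
      by_cases h1 : c = '('
      · rw [if_pos h1] at h; exact absurd h (by decide)
      · rw [if_neg h1] at h
        simp only [findSecond, if_neg h1]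
        split_ifs at h with h2
        · exact ih _ _ h2
        · exact absurd h (find_plus_one_ne t _ h2).1

lemma findSecond_q1 (rs : List Char) (i sp : Int) (p : Nat)
    (h : PySem.Chars.find rs ['('] = (p : Int)) :
    findSecond rs i 1 sp = some (i + p, lastC (rs.take p) i sp) := by
  induction rs generalizing i sp p with
  | nil => rw [find_nil] at h; omega
  | cons c t ih =>
      rw [find_cons] at h
      by_cases h1 : c = '('
      · rw [if_pos h1] at h
        have hp : p = 0 := by omega
        subst hp
        simp [findSecond, h1, lastC]
      · rw [if_neg h1] at h
        simp only [findSecond, if_neg h1]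
        split_ifs at h with h2
        obtain ⟨-, hnn⟩ := find_plus_one_ne t _ h2
        obtain ⟨m, rfl⟩ : ∃ m, p = m + 1 := ⟨p - 1, by omega⟩
        have h' : PySem.Chars.find t ['('] = (m : Int) := by push_cast at h ⊢; omega
        rw [ih _ _ _ h', List.take_succ_cons]
        simp only [lastC]
        have he : i + 1 + (m : Int) = i + ((m : Nat) + 1 : Nat) := by push_cast; omega
        rw [he]

lemma findSecond_q0_none (rs : List Char) (i sp : Int)
    (h : PySem.Chars.find rs ['('] = -1) : findSecond rs i 0 sp = none := by
  induction rs generalizing i sp with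
  | nil => simp [findSecond]
  | cons c t ih =>
      rw [find_cons] at h
      by_cases h1 : c = '('
      · rw [if_pos h1] at h; exact absurd h (by decide)
      · rw [if_neg h1] at h
        simp only [findSecond, if_neg h1]
        split_ifs at h with h2
        · exact ih _ _ h2
        · exact absurd h (find_plus_one_ne t _ h2).1

lemma findSecond_q0 (rs : List Char) (i sp : Int) (p : Nat)
    (h : PySem.Chars.find rs ['('] = (p : Int)) :
    findSecond rs i 0 sp =
      findSecond (rs.drop (p + 1)) (i + p + 1) 1 (lastC (rs.take p) i sp) := by
  induction rs generalizing i sp p with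
  | nil => rw [find_nil] at h; omega
  | cons c t ih =>
      rw [find_cons] at h
      by_cases h1 : c = '('
      · rw [if_pos h1] at h
        have hp : p = 0 := by omega
        subst hp
        simp [findSecond, h1, lastC]
      · rw [if_neg h1] at h
        simp only [findSecond, if_neg h1]
        split_ifs at h with h2
        obtain ⟨-, hnn⟩ := find_plus_one_ne t _ h2
        obtain ⟨m, rfl⟩ : ∃ m, p = m + 1 := ⟨p - 1, by omega⟩
        have h' : PySem.Chars.find t ['('] = (m : Int) := by push_cast at h ⊢; omega
        rw [ih _ _ _ h', List.take_succ_cons, List.drop_succ_cons]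
        simp only [lastC]
        have he : i + 1 + (m : Int) + 1 = i + ((m : Nat) + 1 : Nat) + 1 := by push_cast; omega
        rw [he]

lemma lastC_append (xs ys : List Char) (i sp : Int) :
    lastC (xs ++ ys) i sp = lastC ys (i + xs.length) (lastC xs i sp) := by
  induction xs generalizing i sp with
  | nil => simp [lastC]
  | cons c t ih =>
      simp only [List.cons_append, lastC, ih, List.length_cons]
      congr 1
      push_cast; omega

lemma lastC_no_colon (xs : List Char) (i sp : Int) (h : ':' ∉ xs) : lastC xs i sp = sp := by
  induction xs generalizing i sp with
  | nil => rfl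
  | cons c t ih =>
      simp only [List.mem_cons, not_or] at h
      simp only [lastC, if_neg (Ne.symm h.1)]
      exact ih _ _ h.2

lemma lastC_of_find_rev (zs : List Char) (pc : Nat)
    (h : PySem.Chars.find zs.reverse [':'] = (pc : Int)) :
    lastC zs 0 0 = (zs.length : Int) - 1 - pc := by
  induction zs using List.reverseRecOn generalizing pc with
  | nil => rw [List.reverse_nil, find_nil] at h; omega
  | append_singleton xs c ih =>
      rw [List.reverse_append, List.reverse_singleton, List.singleton_append, find_cons] at h
      rw [lastC_append]
      by_cases h1 : c = ':'
      · have hpc : pc = 0 := by simp [h1] at h; omega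
        simp [h1, lastC, hpc]
      · rw [if_neg h1] at h
        split_ifs at h with h2
        have hp1 : 1 ≤ pc := by
          rcases find_go_lb [':'] xs.reverse 0 with hl | hl
          · exact absurd hl h2
          · simp only [PySem.Chars.find] at h ⊢; omega
        obtain ⟨m, rfl⟩ : ∃ m, pc = m + 1 := ⟨pc - 1, by omega⟩
        have h' : PySem.Chars.find xs.reverse [':'] = (m : Int) := by push_cast at h ⊢; omega
        have hrec := ih _ h'
        simp only [lastC, if_neg h1, hrec, List.length_append, List.length_cons,
          List.length_nil]
        push_cast
        omega

theorem pop_relationship_spec' (stack : String) :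
    pop_relationship stack = pop_relationship_alt stack := by
  unfold pop_relationship pop_relationship_alt
  rw [popALoop_eq]
  simp only []
  set s := stack.toList with hs
  set rs := s.reverse with hrs
  have hsr : s = rs.reverse := by rw [hrs, List.reverse_reverse]
  have hlen : rs.length = s.length := by rw [hrs, List.length_reverse]
  set n := s.length with hn
  rcases findc_spec rs '(' with ⟨hf1, hm1⟩ | ⟨p1, hf1, hp1lt, hp1take⟩
  · rw [findSecond_q0_none _ _ _ hf1, hf1]
    simp
  · rw [findSecond_q0 _ _ _ _ hf1, hf1]
    have hp1n : p1 + 1 ≤ n := by omega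
    have hne : ((p1 : Int)) ≠ -1 := by omega
    have hcast1 : ((p1 : Int) + 1) = ((p1 + 1 : Nat) : Int) := by push_cast; ring
    rw [if_neg hne, hcast1, PySem.Chars.findFrom_natCast rs ['('] (p1 + 1) (by omega)]
    rcases findc_spec (rs.drop (p1 + 1)) '(' with ⟨hf2, hm2⟩ | ⟨p2, hf2, hp2lt, hp2take⟩
    · rw [findSecond_q1_none _ _ _ hf2, hf2]
      simp
    · -- second '(' found at i2 = p1 + 1 + p2
      rw [findSecond_q1 _ _ _ _ hf2, hf2]
      have hlendrop : (rs.drop (p1 + 1)).length = n - (p1 + 1) := by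
        rw [List.length_drop, hlen]
      set i2 : Nat := p1 + 1 + p2 with hi2
      have hi2lt : i2 < n := by omega
      have hidx : (0 : Int) + (p1 : Int) + 1 + (p2 : Int) = (i2 : Int) := by rw [hi2]; push_cast; ring
      have hsp : lastC ((rs.drop (p1 + 1)).take p2) ((0 : Int) + (p1 : Int) + 1) (lastC (rs.take p1) 0 0)
          = lastC (rs.take i2) 0 0 := by
        have htk : rs.take i2 = rs.take (p1 + 1) ++ (rs.drop (p1 + 1)).take p2 := by
          rw [hi2, List.take_add]
        rw [htk, lastC_append, hp1take, lastC_append]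
        have hl1 : (rs.take p1).length = p1 := by
          rw [List.length_take]; omega
        have hl2 : (rs.take p1 ++ ['(']).length = p1 + 1 := by
          rw [List.length_append, hl1]; rfl
        simp only [lastC, hl1, hl2]
        rw [if_neg (by decide : ¬('(' = ':'))]
        push_cast
        ring_nf
      rw [hsp, hidx]
      simp only [if_neg (show ¬ ((p2 : Nat) : Int) = -1 by omega)]
      rw [if_neg (by push_cast; omega : ¬ ((p1 + 1 : Nat) : Int) + (p2 : Int) = -1)]
      -- B's j and the first component
      have hj : (n : Int) - 1 - (((p1 + 1 : Nat) : Int) + (p2 : Int)) = ((n - 1 - i2 : Nat) : Int) := by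
        push_cast; omega
      have hjfix : ((p1 + 1 : Nat) : Int) + (p2 : Int) = (i2 : Int) := by push_cast; omega
      rw [hjfix]
      have hfirstcomp : PySem.List.slice s (some ((n : Int) - 1 - (i2 : Int))) none
          = (rs.take (i2 + 1)).reverse := by
        have h1 : (n : Int) - 1 - (i2 : Int) = ((n - 1 - i2 : Nat) : Int) := by omega
        rw [h1, PySem.List.slice_from_natCast, hsr, List.drop_reverse]
        have harg : s.reverse.length - (n - 1 - i2) = i2 + 1 := by
          rw [List.length_reverse]; omega
        rw [harg]
      -- the ':' search
      have hdropcolon : s.drop (n - i2) = (rs.take i2).reverse := by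
        rw [hsr, List.drop_reverse]
        have harg : s.reverse.length - (n - i2) = i2 := by
          rw [List.length_reverse]; omega
        rw [harg]
      have hjk : (n : Int) - 1 - (i2 : Int) + 1 = ((n - i2 : Nat) : Int) := by omega
      rw [hjk, PySem.Chars.findFrom_natCast s [':'] (n - i2) (by omega), hdropcolon]
      have hA : ([] : List Char) ++ rs.take ((i2 : Int) - 0 + 1).toNat = rs.take (i2 + 1) := by
        rw [List.nil_append]
        have : ((i2 : Int) - 0 + 1).toNat = i2 + 1 := by omega
        rw [this]
      rcases findc_spec ((rs.take i2).reverse) ':' with ⟨hc1, hcm⟩ | ⟨pc, hc1, hpclt, hpctake⟩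
      · -- no colon before the second '('
        have hlc : lastC (rs.take i2) 0 0 = 0 :=
          lastC_no_colon _ _ _ (by intro hmem; exact hcm (List.mem_reverse.mpr hmem))
        rw [hc1, hlc]
        simp only [ite_true, hA, hfirstcomp]
        have hsliceA : PySem.List.slice s none (some (-1 * ((0 : Int) + 1))) = s.dropLast := by
          norm_num
          exact PySem.List.slice_to_neg_one s
        have hsliceB : PySem.List.slice s none (some ((n : Int) - 1)) = s.dropLast := by
          have h1 : (n : Int) - 1 = ((n - 1 : Nat) : Int) := by omega
          rw [h1, PySem.List.slice_to_natCast, List.dropLast_eq_take]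
        rw [hsliceA]
        norm_num
        rw [hsliceB]
      · -- colon at reversed position pc
        have hlenti2 : (rs.take i2).length = i2 := by
          rw [List.length_take]; omega
        have hpci2 : pc < i2 := by
          rw [List.length_reverse, hlenti2] at hpclt; exact hpclt
        have hlc : lastC (rs.take i2) 0 0 = (i2 : Int) - 1 - (pc : Int) := by
          rw [lastC_of_find_rev _ _ hc1, hlenti2]
        rw [hc1, hlc]
        have hpcne : ((pc : Nat) : Int) ≠ -1 := by omega
        rw [if_neg hpcne]
        simp only [hA, hfirstcomp]
        have hcut : ((n - i2 : Nat) : Int) + (pc : Int) = ((n - i2 + pc : Nat) : Int) := by push_cast; ring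
        have hsliceA : PySem.List.slice s none (some (-1 * ((i2 : Int) - 1 - (pc : Int) + 1)))
            = s.take (n - i2 + pc) := by
          have h1 : -1 * ((i2 : Int) - 1 - (pc : Int) + 1) = -((i2 - pc : Nat) : Int) := by
            omega
          rw [h1, PySem.List.slice_to_neg_natCast s (i2 - pc) (by omega)]
          congr 1
          omega
        rw [hsliceA]
        simp only [ne_eq, ite_not, if_neg (by omega : ¬ ((n - i2 : Nat) : Int) + (pc : Int) = -1)]
        rw [hcut, PySem.List.slice_to_natCast]

-- ===== VERDICT (by name: the statement is the Claim_ definition above) =====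
theorem pop_relationship_spec : Claim_equal_pop_relationship := by
  intro stack _
  unfold Spec_pop_relationship
  exact pop_relationship_spec' stack
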